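-- pv_equiv track=rewrite | github.com/MSNYC/svelo | tests/test_decoders.py | _fibonacci_encode
-- ===== SOURCE A (Python) =====
-- def _fibonacci_encode(
--     text: str, seed_a: int, seed_b: int, advance_all: bool
-- ) -> str:
--     a, b = seed_a, seed_b
--     output = []
--     for ch in text:
--         advanced = False
--         if "a" <= ch <= "z":
--             shift = a % 26
--             base = ord("a")
--             output.append(chr((ord(ch) - base + shift) % 26 + base))
--             advanced = True
--         elif "A" <= ch <= "Z":
--             shift = a % 26
--             base = ord("A")
--             output.append(chr((ord(ch) - base + shift) % 26 + base))
--             advanced = True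
--         else:
--             output.append(ch)
--         if advanced or advance_all:
--             a, b = b, a + b
--     return "".join(output)
-- ===== SOURCE B (Python) =====
-- def _is_letter(ch):
--     o = ord(ch)
--     return 97 <= o <= 122 or 65 <= o <= 90
--
--
-- def _shift(ch, s):
--     o = ord(ch)
--     base = 97 if o >= 97 else 65
--     return chr((o - base + s) % 26 + base)
--
--
-- def _keystream(n, a, b):
--     ks = []
--     for _ in range(n):
--         ks.append(a % 26)
--         a, b = b, a + b
--     return ks
--
--
-- def _fibonacci_encode(
--     text: str, seed_a: int, seed_b: int, advance_all: bool
-- ) -> str: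
--     # pass 1: keystream index of every position = count of consuming positions before it
--     idx = []
--     c = 0
--     for ch in text:
--         idx.append(c)
--         if advance_all or _is_letter(ch):
--             c += 1
--     # pass 2: the keystream of exactly c Fibonacci shifts mod 26
--     ks = _keystream(c, seed_a, seed_b)
--     # pass 3: shift each letter by its assigned keystream value, leave the rest alone
--     return "".join(
--         _shift(ch, ks[k]) if _is_letter(ch) else ch
--         for ch, k in zip(text, idx)
--     )
-- ===== Notes on version B (the rewrite author's own statement) =====
-- stated objective: alternative
-- what changed: B replaces A's single stateful loop by three staged passes: a prefix-count pass assigning each position its keystream index, a separate keystream generation of exactly the needed length, and a final stateless zip that shifts each letter by its assigned keystream value.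
import Mathlib
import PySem

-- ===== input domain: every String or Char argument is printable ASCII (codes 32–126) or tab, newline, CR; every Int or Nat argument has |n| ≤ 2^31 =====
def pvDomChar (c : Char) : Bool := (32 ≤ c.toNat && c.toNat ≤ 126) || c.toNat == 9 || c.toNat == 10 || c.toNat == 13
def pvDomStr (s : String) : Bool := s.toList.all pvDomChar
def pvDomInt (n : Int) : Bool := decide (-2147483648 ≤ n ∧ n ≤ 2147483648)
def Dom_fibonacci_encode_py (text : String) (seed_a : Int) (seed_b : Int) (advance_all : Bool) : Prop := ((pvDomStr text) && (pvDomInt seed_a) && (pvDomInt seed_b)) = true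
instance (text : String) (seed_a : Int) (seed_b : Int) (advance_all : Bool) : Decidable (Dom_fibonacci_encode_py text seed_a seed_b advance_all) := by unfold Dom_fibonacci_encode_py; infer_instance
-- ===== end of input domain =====

-- B replaces A's single stateful loop by three staged passes: a prefix-count pass giving each
-- position its keystream index, keystream generation of exactly that length, and a stateless
-- zip applying the shifts (alternative decomposition, same cost).


-- ===== PORT A =====
-- chr((ord(ch) - base + shift) % 26 + base); shift = a % 26 (Python %, nonnegative here),
-- so the argument of Char.ofNat is in [base, base+25]: exact for these ASCII letters.
def pvEncChar (ch : Char) (base : Nat) (shift : Int) : Char :=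
  Char.ofNat ((PySem.Int.mod ((ch.toNat : Int) - (base : Int) + shift) 26 + (base : Int)).toNat)

-- the for-loop over text, state (a, b); 'advanced' flag folded into the branch structure
def pvLoopA : List Char → Int → Int → Bool → List Char
  | [], _, _, _ => []
  | ch :: rest, a, b, adv =>
    if 'a' ≤ ch ∧ ch ≤ 'z' then
      pvEncChar ch 97 (PySem.Int.mod a 26) :: pvLoopA rest b (a + b) adv
    else if 'A' ≤ ch ∧ ch ≤ 'Z' then
      pvEncChar ch 65 (PySem.Int.mod a 26) :: pvLoopA rest b (a + b) adv
    else
      ch :: (if adv then pvLoopA rest b (a + b) adv else pvLoopA rest a b adv)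

def fibonacci_encode_py (text : String) (seed_a : Int) (seed_b : Int) (advance_all : Bool) : String :=
  String.mk (pvLoopA text.toList seed_a seed_b advance_all)

-- ===== PORT B =====
-- ch is ASCII on Dom, so Python's ch-level isalpha is exactly this code-point test
def pvIsLetter (ch : Char) : Bool :=
  (97 ≤ ch.toNat && ch.toNat ≤ 122) || (65 ≤ ch.toNat && ch.toNat ≤ 90)

-- _shift: only called on letters, base chosen by the code point
def pvShift (ch : Char) (s : Int) : Char :=
  let o := ch.toNat
  let base : Nat := if 97 ≤ o then 97 else 65
  Char.ofNat ((PySem.Int.mod ((o : Int) - (base : Int) + s) 26 + (base : Int)).toNat)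

-- _keystream(n, a, b)
def pvKeystream : Nat → Int → Int → List Int
  | 0, _, _ => []
  | n + 1, a, b => PySem.Int.mod a 26 :: pvKeystream n b (a + b)

-- pass 1: (idx, c) — keystream index per position and total number of consuming positions
def pvIdxLoop : List Char → Bool → Nat → List Nat × Nat
  | [], _, c => ([], c)
  | ch :: rest, adv, c =>
    let p := pvIdxLoop rest adv (if adv || pvIsLetter ch then c + 1 else c)
    (c :: p.1, p.2)

def fibonacci_encode_py_alt (text : String) (seed_a : Int) (seed_b : Int) (advance_all : Bool) : String :=
  let p := pvIdxLoop text.toList advance_all 0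
  let ks := pvKeystream p.2 seed_a seed_b
  -- ks[k]: always in range in Source B, ported as getD with default 0
  String.mk (List.zipWith
    (fun ch k => if pvIsLetter ch then pvShift ch (ks.getD k 0) else ch)
    text.toList p.1)

-- ===== PRECONDITION & SPEC =====
def Spec_fibonacci_encode_py (text : String) (seed_a : Int) (seed_b : Int) (advance_all : Bool) (out : String) : Prop := out = fibonacci_encode_py_alt text seed_a seed_b advance_all
instance (text : String) (seed_a : Int) (seed_b : Int) (advance_all : Bool) (out : String) : Decidable (Spec_fibonacci_encode_py text seed_a seed_b advance_all out) := by unfold Spec_fibonacci_encode_py; infer_instance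

-- ===== CLAIM =====
def Claim_equal_fibonacci_encode_py : Prop := ∀ (text : String) (seed_a : Int) (seed_b : Int) (advance_all : Bool), Dom_fibonacci_encode_py text seed_a seed_b advance_all → Spec_fibonacci_encode_py text seed_a seed_b advance_all (fibonacci_encode_py text seed_a seed_b advance_all)

-- ===== LEMMAS AND PROOFS =====

theorem pvCharLe (c d : Char) : (c ≤ d) ↔ c.toNat ≤ d.toNat := by
  rw [Char.le_def, UInt32.le_iff_toNat_le]; exact Iff.rfl

theorem pvLowIff (ch : Char) : ('a' ≤ ch ∧ ch ≤ 'z') ↔ (97 ≤ ch.toNat ∧ ch.toNat ≤ 122) := by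
  rw [pvCharLe, pvCharLe]; exact Iff.rfl

theorem pvUpIff (ch : Char) : ('A' ≤ ch ∧ ch ≤ 'Z') ↔ (65 ≤ ch.toNat ∧ ch.toNat ≤ 90) := by
  rw [pvCharLe, pvCharLe]; exact Iff.rfl

theorem pvNotLow {ch : Char} (h : pvIsLetter ch = false) : ¬('a' ≤ ch ∧ ch ≤ 'z') := by
  intro hc
  rw [pvLowIff] at hc
  simp only [pvIsLetter, Bool.or_eq_false_iff, Bool.and_eq_false_iff,
    decide_eq_false_iff_not] at h
  omega

theorem pvNotUp {ch : Char} (h : pvIsLetter ch = false) : ¬('A' ≤ ch ∧ ch ≤ 'Z') := by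
  intro hc
  rw [pvUpIff] at hc
  simp only [pvIsLetter, Bool.or_eq_false_iff, Bool.and_eq_false_iff,
    decide_eq_false_iff_not] at h
  omega

-- shifting the start counter by one shifts every index and the total by one
theorem pvIdxLoop_succ (cs : List Char) : ∀ (adv : Bool) (c : Nat),
    pvIdxLoop cs adv (c + 1) = ((pvIdxLoop cs adv c).1.map (· + 1), (pvIdxLoop cs adv c).2 + 1) := by
  induction cs with
  | nil => intro adv c; rfl
  | cons ch rest ih =>
    intro adv c
    simp only [pvIdxLoop, List.map]
    split_ifs with h <;> simp [ih]

-- _shift agrees with A's per-letter encoding on letters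
theorem pvShift_eq (ch : Char) (s : Int) (hl : pvIsLetter ch = true) :
    pvShift ch s =
      (if 'a' ≤ ch ∧ ch ≤ 'z' then pvEncChar ch 97 s else pvEncChar ch 65 s) := by
  simp only [pvIsLetter, Bool.or_eq_true, Bool.and_eq_true, decide_eq_true_eq] at hl
  rcases hl with ⟨h1, h2⟩ | ⟨h1, h2⟩
  · rw [if_pos ((pvLowIff ch).mpr ⟨h1, h2⟩)]
    simp only [pvShift, pvEncChar]
    rw [if_pos h1]
  · have hlt : ¬ 97 ≤ ch.toNat := by omega
    rw [if_neg (fun hc => hlt ((pvLowIff ch).mp hc).1)]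
    simp only [pvShift, pvEncChar]
    rw [if_neg hlt]

theorem pvB_main (cs : List Char) : ∀ (a b : Int) (adv : Bool),
    List.zipWith
      (fun ch k => if pvIsLetter ch then
          pvShift ch ((pvKeystream (pvIdxLoop cs adv 0).2 a b).getD k 0) else ch)
      cs (pvIdxLoop cs adv 0).1 = pvLoopA cs a b adv := by
  induction cs with
  | nil => intro a b adv; rfl
  | cons ch rest ih =>
    intro a b adv
    by_cases hcons : (adv || pvIsLetter ch) = true
    · -- consuming position: counter starts at 1 for the tail
      simp only [pvIdxLoop, hcons, if_pos, pvIdxLoop_succ]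
      have htail :
          List.zipWith
            (fun ch' k => if pvIsLetter ch' then
                pvShift ch' ((PySem.Int.mod a 26 ::
                  pvKeystream (pvIdxLoop rest adv 0).2 b (a + b)).getD k 0) else ch')
            rest ((pvIdxLoop rest adv 0).1.map (· + 1))
          = pvLoopA rest b (a + b) adv := by
        rw [List.zipWith_map_right]
        simp only [List.getD_cons_succ]
        exact ih b (a + b) adv
      by_cases hl : pvIsLetter ch = true
      · -- a letter: the head uses ks[0] = a % 26, A shifts it the same way
        have hA : pvLoopA (ch :: rest) a b adv =
            (if 'a' ≤ ch ∧ ch ≤ 'z' then pvEncChar ch 97 (PySem.Int.mod a 26)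
             else pvEncChar ch 65 (PySem.Int.mod a 26)) :: pvLoopA rest b (a + b) adv := by
          simp only [pvIsLetter, Bool.or_eq_true, Bool.and_eq_true, decide_eq_true_eq] at hl
          simp only [pvLoopA]
          rcases hl with ⟨h1, h2⟩ | ⟨h1, h2⟩
          · rw [if_pos ((pvLowIff ch).mpr ⟨h1, h2⟩), if_pos ((pvLowIff ch).mpr ⟨h1, h2⟩)]
          · have hnl : ¬('a' ≤ ch ∧ ch ≤ 'z') := by
              intro hc; have := ((pvLowIff ch).mp hc).1; omega
            rw [if_neg hnl, if_pos ((pvUpIff ch).mpr ⟨h1, h2⟩), if_neg hnl]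
        simp only [List.zipWith, hl, if_pos, pvKeystream, List.getD_cons_zero,
          pvShift_eq ch _ hl, hA]
        rw [htail]
      · -- not a letter, so adv = true: the keystream still advances
        have hl' : pvIsLetter ch = false := by cases h : pvIsLetter ch <;> simp_all
        have hadv : adv = true := by cases adv <;> simp_all
        subst hadv
        simp only [List.zipWith, hl', Bool.false_eq_true, if_false, pvLoopA,
          if_neg (pvNotLow hl'), if_neg (pvNotUp hl'), if_pos, pvKeystream]
        rw [htail]
    · -- non-consuming: adv = false and not a letter
      simp only [Bool.or_eq_true, not_or] at hcons
      obtain ⟨hadv, hl⟩ := hcons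
      have hadv' : adv = false := by cases adv <;> simp_all
      subst hadv'
      have hl' : pvIsLetter ch = false := by cases h : pvIsLetter ch <;> simp_all
      simp only [pvIdxLoop, hl', Bool.or_self, Bool.false_eq_true, if_false,
        List.zipWith, pvLoopA, if_neg (pvNotLow hl'), if_neg (pvNotUp hl')]
      rw [ih a b false]

-- ===== VERDICT =====
theorem fibonacci_encode_py_spec : Claim_equal_fibonacci_encode_py := by
  intro text seed_a seed_b advance_all _
  unfold Spec_fibonacci_encode_py fibonacci_encode_py fibonacci_encode_py_alt
  exact congrArg String.mk (pvB_main text.toList seed_a seed_b advance_all).symm
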